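-- pv_equiv track=rewrite | github.com/wronai/contract | studio/app.py | extract_contract
-- ===== SOURCE A (Python) =====
-- def extract_contract(text: str) -> str:
--     """Extract RCL contract from response"""
--     lines = []
--     in_code_block = False
--
--     for line in text.split('\n'):
--         if line.strip().startswith('```'):
--             in_code_block = not in_code_block
--             continue
--         if in_code_block or any(kw in line for kw in ['app ', 'entity ', 'enum ', 'event ', 'pipeline ', 'alert ', 'dashboard ', 'source ', 'config ']):
--             lines.append(line)
--
--     return '\n'.join(lines) if lines else text
-- ===== SOURCE B (Python) =====
-- KEYWORDS = ['app ', 'entity ', 'enum ', 'event ', 'pipeline ', 'alert ', 'dashboard ', 'source ', 'config ']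
--
--
-- def extract_contract(text: str) -> str:
--     """Extract RCL contract from response"""
--     # Split into fence-delimited segments first, then filter by segment parity.
--     segments = [[]]
--     for line in text.split('\n'):
--         if line.strip().startswith('```'):
--             segments.append([])
--         else:
--             segments[-1].append(line)
--
--     kept = []
--     for i, seg in enumerate(segments):
--         if i % 2 == 1:
--             kept.extend(seg)
--         else:
--             kept.extend(l for l in seg if any(kw in l for kw in KEYWORDS))
--
--     return '\n'.join(kept) if kept else text
-- ===== Notes on version B (the rewrite author's own statement) =====
-- stated objective: alternative
-- what changed: A makes one pass with a toggled in_code_block flag deciding line by line; B first splits the text into fence-delimited segments (dropping fence lines), then keeps whole segments of odd index and keyword-filtered segments of even index.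
import Mathlib
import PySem

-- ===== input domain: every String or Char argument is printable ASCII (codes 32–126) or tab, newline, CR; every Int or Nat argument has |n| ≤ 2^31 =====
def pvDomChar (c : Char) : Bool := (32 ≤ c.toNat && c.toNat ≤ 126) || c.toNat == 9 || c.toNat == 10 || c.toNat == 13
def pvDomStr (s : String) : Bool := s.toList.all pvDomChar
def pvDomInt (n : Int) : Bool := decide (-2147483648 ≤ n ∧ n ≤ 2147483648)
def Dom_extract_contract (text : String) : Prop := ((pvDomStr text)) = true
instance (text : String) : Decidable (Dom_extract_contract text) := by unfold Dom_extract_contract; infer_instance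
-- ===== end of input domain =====

-- B re-decomposes A's single toggled-flag pass into: split into fence-delimited segments, then keep lines by segment parity (objective: alternative; same cost).

-- ===== PORT A =====
def pvKws : List String := ["app ", "entity ", "enum ", "event ", "pipeline ", "alert ", "dashboard ", "source ", "config "]

def pvFence (line : String) : Bool := PySem.Str.startswith (PySem.Str.strip line) "```"

def pvKeep (line : String) : Bool := pvKws.any (fun kw => PySem.Str.isIn kw line)

def pvStepA (st : List String × Bool) (line : String) : List String × Bool :=
  if pvFence line then (st.1, !st.2)
  else if st.2 || pvKeep line then (st.1 ++ [line], st.2)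
  else st

def extract_contract (text : String) : String :=
  let st := ((PySem.Str.split? text "\n").getD []).foldl pvStepA ([], false)
  if st.1.isEmpty then text else PySem.Str.join "\n" st.1

-- ===== PORT B =====
-- segments[-1].append(line)
def pvAppendLast (segs : List (List String)) (l : String) : List (List String) :=
  match segs with
  | [] => []
  | [s] => [s ++ [l]]
  | s :: rest => s :: pvAppendLast rest l

def pvStepB (segs : List (List String)) (line : String) : List (List String) :=
  if pvFence line then segs ++ [[]] else pvAppendLast segs line

def extract_contract_alt (text : String) : String :=
  let segs := ((PySem.Str.split? text "\n").getD []).foldl pvStepB [[]]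
  let kept := (PySem.List.enumerate segs).foldl
    (fun (acc : List String) p =>
      acc ++ (if PySem.Int.mod p.1 2 == 1 then p.2 else p.2.filter pvKeep))
    []
  if kept.isEmpty then text else PySem.Str.join "\n" kept

-- ===== PRECONDITION & SPEC =====
def Spec_extract_contract (text : String) (out : String) : Prop := out = extract_contract_alt text
instance (text : String) (out : String) : Decidable (Spec_extract_contract text out) := by unfold Spec_extract_contract; infer_instance

-- ===== CLAIM (what is proved, stated in full; the proofs are below) =====
def Claim_equal_extract_contract : Prop := ∀ (text : String), Dom_extract_contract text → Spec_extract_contract text (extract_contract text)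

-- ===== LEMMAS AND PROOFS =====

-- the lines both programs keep, in order, starting from code-block flag `flag`
def pvExtractP : List String → Bool → List String
  | [], _ => []
  | l :: ls, flag =>
    if pvFence l then pvExtractP ls (!flag)
    else if flag || pvKeep l then l :: pvExtractP ls flag
    else pvExtractP ls flag

lemma pvLoopA (ls : List String) : ∀ (acc : List String) (flag : Bool),
    (ls.foldl pvStepA (acc, flag)).1 = acc ++ pvExtractP ls flag := by
  induction ls with
  | nil => intro acc flag; simp [pvExtractP]
  | cons l ls ih =>
    intro acc flag
    rw [List.foldl_cons]
    by_cases hf : pvFence l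
    · rw [show pvStepA (acc, flag) l = (acc, !flag) from by simp [pvStepA, hf], ih]
      simp [pvExtractP, hf]
    · by_cases hk : flag || pvKeep l
      · rw [show pvStepA (acc, flag) l = (acc ++ [l], flag) from by simp [pvStepA, hf, hk], ih]
        simp [pvExtractP, hf, hk]
      · rw [show pvStepA (acc, flag) l = (acc, flag) from by simp [pvStepA, hf, hk], ih]
        simp [pvExtractP, hf, hk]

-- parity-driven flatten of the segments: `par` is the parity of the first segment's index
def pvFlat : Bool → List (List String) → List String
  | _, [] => []
  | par, s :: rest => (if par then s else s.filter pvKeep) ++ pvFlat (!par) rest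

lemma pvParityFlip (i : Int) :
    (PySem.Int.mod (i + 1) 2 == 1) = !(PySem.Int.mod i 2 == 1) := by
  rw [PySem.Int.mod_eq_emod_of_pos (by norm_num : (0:Int) < 2),
      PySem.Int.mod_eq_emod_of_pos (by norm_num : (0:Int) < 2)]
  have h1 : i % 2 = 0 ∨ i % 2 = 1 := Int.emod_two_eq_zero_or_one i
  have h2 : (i + 1) % 2 = 1 - i % 2 := by omega
  rcases h1 with h | h <;> simp [h2, h]

lemma pvFlatFoldl (segs : List (List String)) : ∀ (i : Int) (acc : List String),
    (PySem.List.enumerate segs i).foldl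
      (fun (acc : List String) p =>
        acc ++ (if PySem.Int.mod p.1 2 == 1 then p.2 else p.2.filter pvKeep))
      acc = acc ++ pvFlat (PySem.Int.mod i 2 == 1) segs := by
  induction segs with
  | nil => intro i acc; simp [PySem.List.enumerate_nil, pvFlat]
  | cons s rest ih =>
    intro i acc
    rw [PySem.List.enumerate_cons]
    simp only [List.foldl_cons, pvFlat, ih, pvParityFlip]
    simp

lemma pvFlat_snoc_nil (segs : List (List String)) : ∀ (par : Bool),
    pvFlat par (segs ++ [[]]) = pvFlat par segs := by
  induction segs with
  | nil => intro par; simp [pvFlat]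
  | cons s rest ih => intro par; simp [pvFlat, ih]

lemma pvAppendLast_ne_nil (segs : List (List String)) (l : String) (h : segs ≠ []) :
    pvAppendLast segs l ≠ [] := by
  cases segs with
  | nil => exact absurd rfl h
  | cons s rest => cases rest <;> simp [pvAppendLast]

lemma pvAppendLast_length (segs : List (List String)) (l : String) :
    (pvAppendLast segs l).length = segs.length := by
  induction segs with
  | nil => simp [pvAppendLast]
  | cons s rest ih => cases rest <;> simp_all [pvAppendLast]

lemma pvFlat_appendLast (segs : List (List String)) (l : String) (h : segs ≠ []) :
    ∀ (par : Bool), pvFlat par (pvAppendLast segs l) =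
      pvFlat par segs ++
        (if par ^^ decide ((segs.length - 1) % 2 = 1) then [l]
         else if pvKeep l then [l] else []) := by
  induction segs with
  | nil => exact absurd rfl h
  | cons s rest ih =>
    intro par
    cases rest with
    | nil =>
      cases par <;> by_cases hk : pvKeep l <;>
        simp [pvAppendLast, pvFlat, hk, List.filter_append]
    | cons s2 rest2 =>
      have hne : (s2 :: rest2 : List (List String)) ≠ [] := by simp
      simp only [pvAppendLast, pvFlat, ih hne (!par), List.length_cons]
      rcases Nat.mod_two_eq_zero_or_one rest2.length with hm | hm <;> cases par <;>
        simp [Nat.add_mod, hm, List.append_assoc]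

-- the code-block flag A maintains = parity of the index of B's current (last) segment
def pvFlagOf (segs : List (List String)) : Bool := decide ((segs.length - 1) % 2 = 1)

lemma pvLoopB (ls : List String) : ∀ (segs : List (List String)), segs ≠ [] →
    pvFlat false (ls.foldl pvStepB segs) =
      pvFlat false segs ++ pvExtractP ls (pvFlagOf segs) := by
  induction ls with
  | nil => intro segs _; simp [pvExtractP]
  | cons l ls ih =>
    intro segs h
    rw [List.foldl_cons]
    by_cases hf : pvFence l
    · -- fence: new empty segment; flag flips
      rw [show pvStepB segs l = segs ++ [[]] from by simp [pvStepB, hf],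
          ih _ (by simp), pvFlat_snoc_nil]
      have hflag : pvFlagOf (segs ++ [[]]) = !pvFlagOf segs := by
        obtain ⟨s0, rest, rfl⟩ := List.exists_cons_of_ne_nil h
        unfold pvFlagOf
        simp only [List.length_append, List.length_cons, List.length_nil]
        rcases Nat.mod_two_eq_zero_or_one rest.length with hm | hm <;>
          simp [Nat.add_mod, hm]
      rw [hflag]
      simp [pvExtractP, hf]
    · -- ordinary line: appended to the current (last) segment
      rw [show pvStepB segs l = pvAppendLast segs l from by simp [pvStepB, hf],
          ih _ (pvAppendLast_ne_nil segs l h), pvFlat_appendLast segs l h false]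
      have hflag : pvFlagOf (pvAppendLast segs l) = pvFlagOf segs := by
        unfold pvFlagOf; rw [pvAppendLast_length]
      rw [hflag, List.append_assoc]
      unfold pvFlagOf
      by_cases hp : decide ((segs.length - 1) % 2 = 1) = true <;>
        by_cases hk : pvKeep l <;>
          simp [pvExtractP, hf, hk, hp]

-- ===== VERDICT (by name: the statement is the Claim_ definition above) =====
theorem extract_contract_spec : Claim_equal_extract_contract := by
  intro text _
  unfold Spec_extract_contract extract_contract extract_contract_alt
  have h0 : (PySem.Int.mod 0 2 == 1) = false := by decide
  simp only [pvLoopA, pvFlatFoldl, h0]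
  rw [pvLoopB _ [[]] (by simp)]
  simp [pvFlat, pvFlagOf]
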